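-- pv_equiv track=rewrite | github.com/UTD-FAST-Lab/ECSTATIC | src/ecstatic/localization/DiffLocalizer.py | get_fragmentation_for_file
-- ===== SOURCE A (Python) =====
-- def get_fragmentation_for_file(fDict):
--     classmap = dict();
--     for x in [*fDict]:
--         classN = x.split(":")[0]
--         if classmap.get(classN) is not None:
--             #we've seen this class b4
--             classmap[classN] = classmap[classN] + fDict[x]
--         else:
--             classmap[classN] = fDict[x];
--     return classmap;
-- ===== SOURCE B (Python) =====
-- def get_fragmentation_for_file(fDict):
--     pairs = [(k.split(":")[0], v) for k, v in fDict.items()]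
--     prefixes = list(dict.fromkeys(p for p, _ in pairs))
--     return {p: sum(v for q, v in pairs if q == p) for p in prefixes}
-- ===== Notes on version B (the rewrite author's own statement) =====
-- stated objective: alternative
-- what changed: Replaced A's single-pass dict accumulation (lookup-then-add per key) by a two-phase reduction: extract (prefix, value) pairs, dedup the prefixes in first-occurrence order, then build the result with one filter-and-sum per distinct prefix.
import Mathlib
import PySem

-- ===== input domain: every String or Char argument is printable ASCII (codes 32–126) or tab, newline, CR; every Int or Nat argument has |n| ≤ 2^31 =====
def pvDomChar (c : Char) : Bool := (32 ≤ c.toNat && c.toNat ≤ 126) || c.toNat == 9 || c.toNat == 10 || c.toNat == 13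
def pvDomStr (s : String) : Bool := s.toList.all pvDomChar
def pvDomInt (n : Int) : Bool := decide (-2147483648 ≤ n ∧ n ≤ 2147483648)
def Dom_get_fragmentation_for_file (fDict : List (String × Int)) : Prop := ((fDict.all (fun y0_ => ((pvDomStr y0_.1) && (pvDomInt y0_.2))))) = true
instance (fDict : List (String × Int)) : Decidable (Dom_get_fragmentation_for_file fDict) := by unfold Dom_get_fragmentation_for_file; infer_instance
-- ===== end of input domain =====

-- B re-implements A's incremental dict accumulation as an order-preserving dedup of class
-- prefixes followed by a per-prefix filter-and-sum (objective: alternative decomposition, same totals).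

-- x.split(":")[0]  (split on a nonempty separator never fails and is never empty, so [0] never raises)
def pvPrefix (s : String) : String := ((PySem.Str.split? s ":").getD []).headD ""

-- ===== PORT A =====
def get_fragmentation_for_file (fDict : List (String × Int)) : List (String × Int) :=
  let d := PySem.Dict.ofList fDict
  (List.foldl (fun cm x =>
      let classN := pvPrefix x
      match cm.get? classN with
      | some v => cm.insert classN (v + d.getD x 0)
      | none   => cm.insert classN (d.getD x 0)) PySem.Dict.empty d.keys).items

-- ===== PORT B =====
def get_fragmentation_for_file_alt (fDict : List (String × Int)) : List (String × Int) :=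
  let pairs := (PySem.Dict.ofList fDict).items.map (fun kv => (pvPrefix kv.1, kv.2))
  let prefixes := PySem.List.dedup (pairs.map (fun qv => qv.1))
  prefixes.map (fun p => (p, ((pairs.filter (fun qv => qv.1 == p)).map (fun qv => qv.2)).sum))

-- ===== PRECONDITION & SPEC =====
def Spec_get_fragmentation_for_file (fDict : List (String × Int)) (out : List (String × Int)) : Prop := out = get_fragmentation_for_file_alt fDict
instance (fDict : List (String × Int)) (out : List (String × Int)) : Decidable (Spec_get_fragmentation_for_file fDict out) := by unfold Spec_get_fragmentation_for_file; infer_instance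

-- ===== CLAIM (what is proved, stated in full; the proofs are below) =====
def Claim_equal_get_fragmentation_for_file : Prop := ∀ (fDict : List (String × Int)), Dom_get_fragmentation_for_file fDict → Spec_get_fragmentation_for_file fDict (get_fragmentation_for_file fDict)

-- ===== LEMMAS AND PROOFS =====

-- A's loop body, acting on one (prefix, value) pair
def pvStep (cm : PySem.Dict String Int) (pv : String × Int) : PySem.Dict String Int :=
  match cm.get? pv.1 with
  | some v => cm.insert pv.1 (v + pv.2)
  | none   => cm.insert pv.1 pv.2

-- B's dedup/filter/sum result, on a list of (prefix, value) pairs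
def pvOut (ps : List (String × Int)) : List (String × Int) :=
  (PySem.List.dedup (ps.map (fun qv => qv.1))).map
    (fun p => (p, ((ps.filter (fun qv => qv.1 == p)).map (fun qv => qv.2)).sum))

lemma pvOut_fst (ps : List (String × Int)) :
    (pvOut ps).map (fun q => q.1) = PySem.List.dedup (ps.map (fun qv => qv.1)) := by
  rw [pvOut, List.map_map]
  exact List.map_id'' (fun p => rfl) _

lemma pvGrp (ps : List (String × Int)) :
    (List.foldl pvStep PySem.Dict.empty ps).items = pvOut ps := by
  induction ps using List.reverseRecOn with
  | nil => rfl
  | append_singleton ps x ih =>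
    obtain ⟨p, v⟩ := x
    rw [List.foldl_append, List.foldl_cons, List.foldl_nil]
    set D := List.foldl pvStep PySem.Dict.empty ps with hDdef
    have hkeys : D.keys = PySem.List.dedup (ps.map (fun qv => qv.1)) := by
      show (D.items.map (fun q => q.1)) = _
      rw [ih]; exact pvOut_fst ps
    have hnd : D.keys.Nodup := by
      rw [hkeys, PySem.List.dedup_eq_ofList]; exact PySem.Set.nodup_ofList _
    have hfst : (ps ++ [(p, v)]).map (fun qv : String × Int => qv.1)
        = ps.map (fun qv => qv.1) ++ [p] := by simp
    by_cases hmem : p ∈ PySem.List.dedup (ps.map (fun qv : String × Int => qv.1))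
    · -- prefix already seen: in-place overwrite on A's side, same dedup list on B's side
      have hp : p ∈ ps.map (fun qv : String × Int => qv.1) :=
        (PySem.List.mem_dedup _ _).mp hmem
      have hitem : (p, ((ps.filter (fun qv => qv.1 == p)).map (fun qv => qv.2)).sum) ∈ D.items := by
        rw [ih, pvOut]; exact List.mem_map_of_mem hmem
      have hget : D.get? p = some ((ps.filter (fun qv => qv.1 == p)).map (fun qv => qv.2)).sum :=
        PySem.Dict.get?_of_mem_items D hitem hnd
      have hcont : D.contains p = true := by
        rw [PySem.Dict.contains_eq_isSome_get?, hget]; rfl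
      have hstep : pvStep D (p, v)
          = D.insert p (((ps.filter (fun qv => qv.1 == p)).map (fun qv => qv.2)).sum + v) := by
        simp [pvStep, hget]
      have hadd : (PySem.Set.ofList (ps.map (fun qv : String × Int => qv.1))).add p
          = PySem.Set.ofList (ps.map (fun qv : String × Int => qv.1)) := by
        simp only [PySem.Set.add]
        rw [if_pos]
        simpa using (PySem.Set.mem_ofList _ p).mpr hp
      rw [hstep, PySem.Dict.items_insert_of_contains D _ hcont, ih, pvOut, pvOut, hfst,
        PySem.List.dedup_eq_ofList, PySem.List.dedup_eq_ofList, PySem.Set.ofList_append_singleton,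
        hadd, List.map_map]
      refine List.map_congr_left (fun q hq => ?_)
      by_cases hqp : q = p
      · subst hqp; simp [List.filter_append]
      · simp [List.filter_append, hqp, Ne.symm hqp]
    · -- new prefix: appended at the end on both sides
      have hget : D.get? p = none := by
        rw [PySem.Dict.get?_eq_none_iff_not_mem_keys, hkeys]; exact hmem
      have hcont : D.contains p = false := by
        rw [PySem.Dict.contains_eq_isSome_get?, hget]; rfl
      have hstep : pvStep D (p, v) = D.insert p v := by simp [pvStep, hget]
      have hnotps : p ∉ ps.map (fun qv : String × Int => qv.1) := by
        intro h; exact hmem ((PySem.List.mem_dedup _ _).mpr h)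
      have hfilter : ps.filter (fun qv : String × Int => qv.1 == p) = [] := by
        rw [List.filter_eq_nil_iff]
        intro qv hqv
        simp only [beq_iff_eq]
        intro h; exact hnotps (h ▸ List.mem_map_of_mem hqv)
      have hadd : (PySem.Set.ofList (ps.map (fun qv : String × Int => qv.1))).add p
          = PySem.Set.ofList (ps.map (fun qv : String × Int => qv.1)) ++ [p] := by
        simp only [PySem.Set.add]
        rw [if_neg]
        intro h
        exact hnotps ((PySem.Set.mem_ofList _ p).mp (by simpa using h))
      rw [hstep, PySem.Dict.items_insert_of_not_contains D _ hcont, ih, pvOut, pvOut, hfst,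
        PySem.List.dedup_eq_ofList, PySem.List.dedup_eq_ofList, PySem.Set.ofList_append_singleton,
        hadd, List.map_append]
      congr 1
      · refine List.map_congr_left (fun q hq => ?_)
        have hqp : q ≠ p := fun h =>
          hnotps ((PySem.Set.mem_ofList _ p).mp (h ▸ hq))
        simp [List.filter_append, Ne.symm hqp]
      · simp [List.filter_append, hfilter]

-- ===== VERDICT (by name: the statement is the Claim_ definition above) =====
theorem get_fragmentation_for_file_spec : Claim_equal_get_fragmentation_for_file := by
  intro fDict _
  show (List.foldl (fun cm x =>
      let classN := pvPrefix x
      match cm.get? classN with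
      | some v => cm.insert classN (v + (PySem.Dict.ofList fDict).getD x 0)
      | none   => cm.insert classN ((PySem.Dict.ofList fDict).getD x 0))
      PySem.Dict.empty (PySem.Dict.ofList fDict).keys).items
    = pvOut ((PySem.Dict.ofList fDict).items.map (fun kv => (pvPrefix kv.1, kv.2)))
  have hnd : (PySem.Dict.ofList fDict).keys.Nodup := PySem.Dict.nodup_keys_ofList fDict
  have hkeys : (PySem.Dict.ofList fDict).keys
      = (PySem.Dict.ofList fDict).items.map (fun q => q.1) := rfl
  have h1 : List.foldl (fun cm x =>
      let classN := pvPrefix x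
      match cm.get? classN with
      | some v => cm.insert classN (v + (PySem.Dict.ofList fDict).getD x 0)
      | none   => cm.insert classN ((PySem.Dict.ofList fDict).getD x 0))
      PySem.Dict.empty (PySem.Dict.ofList fDict).keys
      = List.foldl pvStep PySem.Dict.empty
        ((PySem.Dict.ofList fDict).items.map (fun kv => (pvPrefix kv.1, kv.2))) := by
    rw [hkeys, List.foldl_map, List.foldl_map]
    refine PySem.List.foldl_congr_mem _ _ _ _ (fun acc kv hkv => ?_)
    obtain ⟨k, v⟩ := kv
    have hg : (PySem.Dict.ofList fDict).getD k 0 = v :=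
      PySem.Dict.getD_of_mem_items _ hkv hnd 0
    cases hA : acc.get? (pvPrefix k) <;> simp [pvStep, hA, hg]
  rw [h1]
  exact pvGrp _
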